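-- pv_equiv track=rewrite | github.com/JereLintusalo/python | Harjoitustehtävät6.py/teht 7.py | laske_esiintymat
-- ===== SOURCE A (Python) =====
-- def laske_esiintymat(mj):
--     merkit = []
--     maarat = []
--
--     for merkki in mj:
--         if merkki.isalpha():
--             if merkki in merkit:
--                 indeksi = merkit.index(merkki)
--                 maarat[indeksi] += 1
--             else:
--                 merkit.append(merkki)
--                 maarat.append(1)
--
--     return merkit, maarat
-- ===== SOURCE B (Python) =====
-- def laske_esiintymat(mj):
--     # Staged passes: extract letters, dedupe preserving first appearance,
--     # then count each distinct letter in a separate pass.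
--     letters = [c for c in mj if c.isalpha()]
--     merkit = list(dict.fromkeys(letters))
--     maarat = [letters.count(m) for m in merkit]
--     return merkit, maarat
-- ===== Notes on version B (the rewrite author's own statement) =====
-- stated objective: idiomatic
-- what changed: B replaces A's single pass with inline membership/index bookkeeping on parallel lists by three staged passes: filter the letters, dedupe them in first-appearance order with dict.fromkeys, then count each distinct letter with list.count.
import Mathlib
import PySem

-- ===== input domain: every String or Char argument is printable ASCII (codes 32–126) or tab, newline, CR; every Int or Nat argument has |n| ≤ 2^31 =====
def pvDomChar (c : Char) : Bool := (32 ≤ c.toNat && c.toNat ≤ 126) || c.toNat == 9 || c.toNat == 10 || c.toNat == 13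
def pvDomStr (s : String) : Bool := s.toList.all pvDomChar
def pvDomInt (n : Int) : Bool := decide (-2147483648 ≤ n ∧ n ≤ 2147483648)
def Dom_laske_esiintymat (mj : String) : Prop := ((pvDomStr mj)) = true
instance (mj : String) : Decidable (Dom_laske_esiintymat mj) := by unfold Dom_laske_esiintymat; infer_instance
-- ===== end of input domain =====

-- B recomputes the same result in three staged passes (filter letters, dedupe in
-- first-appearance order, count each distinct letter) instead of A's single pass
-- with inline membership/index bookkeeping; objective: idiomatic, same cost.


-- ===== PORT A =====
-- A's loop: parallel lists merkit/maarat; on an alpha char either bump the count at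
-- merkit.index(merkki) or append the char with count 1.  Python's 1-char strings are
-- carried as Char and wrapped into String at the very end (both ports do the same).
-- 'merkit.index(merkki)' is reached only under 'merkki in merkit', so List.idxOf is exact;
-- 'maarat[indeksi] += 1' with indeksi < maarat.length is List.set/getD, exact.
def laskeGoA : List Char → List Char → List Int → List Char × List Int
  | [], merkit, maarat => (merkit, maarat)
  | merkki :: rest, merkit, maarat =>
    if PySem.Chars.isalpha merkki then
      if merkit.contains merkki then
        let indeksi := merkit.idxOf merkki
        laskeGoA rest merkit (maarat.set indeksi (maarat.getD indeksi 0 + 1))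
      else
        laskeGoA rest (merkit ++ [merkki]) (maarat ++ [1])
    else
      laskeGoA rest merkit maarat

def laske_esiintymat (mj : String) : List String × List Int :=
  let r := laskeGoA mj.toList [] []
  (r.1.map (fun c => String.ofList [c]), r.2)

-- ===== PORT B =====
-- B's staged passes: [c for c in mj if c.isalpha()] → List.filter;
-- list(dict.fromkeys(letters)) (first-appearance dedupe) → PySem.Set.ofList (exact:
-- both keep the distinct elements in first-appearance order);
-- [letters.count(m) for m in merkit] → List.map with List.count.
def laske_esiintymat_alt (mj : String) : List String × List Int :=
  let letters := mj.toList.filter PySem.Chars.isalpha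
  let merkit := PySem.Set.ofList letters
  let maarat := merkit.map (fun m => (letters.count m : Int))
  (merkit.map (fun c => String.ofList [c]), maarat)

-- ===== PRECONDITION & SPEC =====
def Spec_laske_esiintymat (mj : String) (out : List String × List Int) : Prop := out = laske_esiintymat_alt mj
instance (mj : String) (out : List String × List Int) : Decidable (Spec_laske_esiintymat mj out) := by unfold Spec_laske_esiintymat; infer_instance

-- ===== CLAIM (what is proved, stated in full; the proofs are below) =====
def Claim_equal_laske_esiintymat : Prop := ∀ (mj : String), Dom_laske_esiintymat mj → Spec_laske_esiintymat mj (laske_esiintymat mj)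

-- ===== LEMMAS AND PROOFS =====

lemma mem_foldl_set_add {c : Char} {xs acc : List Char}
    (h : c ∈ xs.foldl PySem.Set.add acc) : c ∈ acc ∨ c ∈ xs := by
  induction xs generalizing acc with
  | nil => exact Or.inl h
  | cons x t ih =>
    rcases ih (acc := PySem.Set.add acc x) h with h' | h'
    · unfold PySem.Set.add at h'
      split at h'
      · exact Or.inl h'
      · rcases List.mem_append.1 h' with h'' | h''
        · exact Or.inl h''
        · simp at h''; subst h''; exact Or.inr (List.mem_cons_self)
    · exact Or.inr (List.mem_cons_of_mem _ h')

lemma laskeGoA_spec (rest : List Char) :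
    ∀ (merkit : List Char) (maarat : List Int),
    maarat.length = merkit.length → merkit.Nodup →
    (∀ c ∈ merkit, PySem.Chars.isalpha c = true) →
    laskeGoA rest merkit maarat =
      ((rest.filter PySem.Chars.isalpha).foldl PySem.Set.add merkit,
       ((rest.filter PySem.Chars.isalpha).foldl PySem.Set.add merkit).map
         (fun c => (if c ∈ merkit then maarat.getD (merkit.idxOf c) 0 else 0)
            + (rest.count c : Int))) := by
  induction rest with
  | nil =>
    intro merkit maarat hlen hnd _
    simp only [laskeGoA, List.filter_nil, List.foldl_nil, List.count_nil, Nat.cast_zero,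
      add_zero]
    refine Prod.ext rfl ?_
    apply List.ext_getElem (by simpa using hlen)
    intro i h1 h2
    have hi : i < merkit.length := by simpa using h2
    simp only [List.getElem_map, if_pos (List.getElem_mem hi),
      List.Nodup.idxOf_getElem hnd i hi, List.getD_eq_getElem?_getD,
      List.getElem?_eq_getElem h1, Option.getD_some]
  | cons merkki rest ih =>
    intro merkit maarat hlen hnd halpha
    by_cases ha : PySem.Chars.isalpha merkki = true
    · by_cases hm : merkit.contains merkki = true
      · -- seen before: bump count at idxOf
        have hmem : merkki ∈ merkit := by simpa using hm
        have hidx : merkit.idxOf merkki < merkit.length := List.idxOf_lt_length_of_mem hmem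
        simp only [laskeGoA, ha, hm, if_true]
        rw [ih _ _ (by simp [hlen]) hnd halpha]
        have hfoldl : (List.filter PySem.Chars.isalpha (merkki :: rest)).foldl PySem.Set.add merkit
            = (List.filter PySem.Chars.isalpha rest).foldl PySem.Set.add merkit := by
          simp only [List.filter_cons, ha, if_true, List.foldl_cons, PySem.Set.add,
            PySem.Set.contains, hm]
        refine Prod.ext (by rw [hfoldl]) ?_
        rw [hfoldl]
        apply List.map_congr_left
        intro c _
        by_cases hc : c ∈ merkit
        · simp only [if_pos hc]
          by_cases hce : c = merkki
          · subst hce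
            rw [List.getD_eq_getElem?_getD, List.getElem?_set_self' ,
              List.getElem?_eq_getElem (by omega : merkit.idxOf c < maarat.length)]
            simp [List.count_cons_self]
            ring
          · have hne : merkit.idxOf merkki ≠ merkit.idxOf c := by
              intro hEq
              apply hce
              have h1 : merkit[merkit.idxOf c]'(List.idxOf_lt_length_of_mem hc) = c :=
                List.getElem_idxOf _
              have h2 : merkit[merkit.idxOf merkki]'hidx = merkki := List.getElem_idxOf _
              simp only [hEq] at h2
              exact h1.symm.trans h2
            rw [List.getD_eq_getElem?_getD, List.getElem?_set_ne hne,
              ← List.getD_eq_getElem?_getD]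
            have : (merkki :: rest).count c = rest.count c := by
              rw [List.count_cons]; simp [Ne.symm hce]
            rw [this]
        · have hce : c ≠ merkki := fun h => hc (h ▸ hmem)
          simp only [if_neg hc]
          have : (merkki :: rest).count c = rest.count c := by
            rw [List.count_cons]; simp [Ne.symm hce]
          rw [this]
      · -- new letter: append
        have hnot : merkki ∉ merkit := by simpa using hm
        have hmf : merkit.contains merkki = false := by simpa using hm
        simp only [laskeGoA, ha, hmf, if_true, Bool.false_eq_true, if_false]
        rw [ih _ _ (by simp [hlen]) (by simp [List.nodup_append, hnd]; exact fun a haM hEq => hnot (hEq ▸ haM))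
          (by intro c hc
              rcases List.mem_append.1 hc with h | h
              · exact halpha c h
              · simp at h; subst h; exact ha)]
        have hfoldl : (List.filter PySem.Chars.isalpha (merkki :: rest)).foldl PySem.Set.add merkit
            = (List.filter PySem.Chars.isalpha rest).foldl PySem.Set.add (merkit ++ [merkki]) := by
          simp only [List.filter_cons, ha, if_true, List.foldl_cons, PySem.Set.add,
            PySem.Set.contains, hmf, Bool.false_eq_true, if_false]
        refine Prod.ext (by rw [hfoldl]) ?_
        rw [hfoldl]
        apply List.map_congr_left
        intro c _
        by_cases hc : c ∈ merkit
        · have hce : c ≠ merkki := fun h => hnot (h ▸ hc)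
          have hcm : c ∈ merkit ++ [merkki] := List.mem_append.2 (Or.inl hc)
          simp only [if_pos hc, if_pos hcm, List.idxOf_append_of_mem hc]
          rw [List.getD_eq_getElem?_getD, List.getElem?_append_left (by have := List.idxOf_lt_length_of_mem hc; omega),
            ← List.getD_eq_getElem?_getD]
          have : (merkki :: rest).count c = rest.count c := by
            rw [List.count_cons]; simp [Ne.symm hce]
          rw [this]
        · by_cases hce : c = merkki
          · subst hce
            have hcm : c ∈ merkit ++ [c] := List.mem_append.2 (Or.inr (by simp))
            simp only [if_neg hc, if_pos hcm, List.idxOf_append_of_notMem hc]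
            rw [List.getD_eq_getElem?_getD]
            have : (maarat ++ [1])[merkit.length + [c].idxOf c]? = some 1 := by
              simp [hlen]
            rw [this]
            simp [List.count_cons_self]
            ring
          · have hcm : c ∉ merkit ++ [merkki] := by
              simp [hc, hce]
            simp only [if_neg hc, if_neg hcm]
            have : (merkki :: rest).count c = rest.count c := by
              rw [List.count_cons]; simp [Ne.symm hce]
            rw [this]
    · -- not a letter: skipped
      simp only [laskeGoA, ha, Bool.false_eq_true, if_false]
      rw [ih _ _ hlen hnd halpha]
      have hfoldl : (List.filter PySem.Chars.isalpha (merkki :: rest))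
          = List.filter PySem.Chars.isalpha rest := by
        simp [ha]
      refine Prod.ext (by rw [hfoldl]) ?_
      rw [hfoldl]
      apply List.map_congr_left
      intro c hcM
      have hce : c ≠ merkki := by
        intro h; subst h
        rcases mem_foldl_set_add hcM with h | h
        · exact ha (halpha c h)
        · exact ha (List.of_mem_filter h)
      have : (merkki :: rest).count c = rest.count c := by
        rw [List.count_cons]; simp [Ne.symm hce]
      rw [this]

-- ===== VERDICT (by name: the statement is the Claim_ definition above) =====
theorem laske_esiintymat_spec : Claim_equal_laske_esiintymat := by
  unfold Claim_equal_laske_esiintymat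
  intro mj _
  unfold Spec_laske_esiintymat laske_esiintymat laske_esiintymat_alt
  have hA := laskeGoA_spec mj.toList [] [] rfl List.nodup_nil (by simp)
  rw [hA]
  have hset : (mj.toList.filter PySem.Chars.isalpha).foldl PySem.Set.add ([] : List Char)
      = PySem.Set.ofList (mj.toList.filter PySem.Chars.isalpha) := rfl
  refine Prod.ext (by simp [hset]) ?_
  simp only [hset]
  apply List.map_congr_left
  intro c hc
  have hcF : c ∈ mj.toList.filter PySem.Chars.isalpha := by
    simpa [PySem.Set.mem_ofList] using hc
  have hpa : PySem.Chars.isalpha c = true := List.of_mem_filter hcF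
  simp [List.count_filter hpa]
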